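-- pv_equiv track=rewrite | github.com/Alatius/cavallinlatin | proofread/text_alignment.py | clean_html_text
-- ===== SOURCE A (Python) =====
-- def strip_tags_with_positions(text):
--     """Strip tags from text, returning (clean_text, mapping) where mapping[i]
--     gives the position in the original text for clean_text[i]."""
--     result = []
--     mapping = []
--     i = 0
--     while i < len(text):
--         if text[i] == '<':
--             end = text.find('>', i)
--             if end == -1:
--                 result.append(text[i])
--                 mapping.append(i)
--                 i += 1
--             else:
--                 i = end + 1
--         else:
--             result.append(text[i])
--             mapping.append(i)
--             i += 1
--     return ''.join(result), mapping
--
-- def clean_html_text(html):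
--     """Clean HTML for alignment: strip tags, collapse whitespace.
--     Returns (clean_text, mapping_to_original)."""
--     text, mapping = strip_tags_with_positions(html)
--
--     result = []
--     result_map = []
--     for i, ch in enumerate(text):
--         if ch in (' ', '\n', '\t'):
--             if result and result[-1] != ' ':
--                 result.append(' ')
--                 result_map.append(mapping[i])
--         else:
--             result.append(ch)
--             result_map.append(mapping[i])
--     return ''.join(result), result_map
-- ===== SOURCE B (Python) =====
-- def clean_html_text(html):
--     """Clean HTML for alignment: strip tags, collapse whitespace.
--     Returns (clean_text, mapping_to_original).
--     Single fused pass over the raw html: no intermediate stripped string/mapping."""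
--     result = []
--     result_map = []
--     can_space = False  # output nonempty and its last char is not a space
--     i = 0
--     n = len(html)
--     while i < n:
--         ch = html[i]
--         if ch == '<':
--             end = html.find('>', i)
--             if end == -1:
--                 result.append('<')
--                 result_map.append(i)
--                 can_space = True
--                 i += 1
--             else:
--                 i = end + 1
--         elif ch in ' \n\t':
--             if can_space:
--                 result.append(' ')
--                 result_map.append(i)
--                 can_space = False
--             i += 1
--         else:
--             result.append(ch)
--             result_map.append(i)
--             can_space = True
--             i += 1
--     return ''.join(result), result_map
-- ===== Notes on version B (the rewrite author's own statement) =====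
-- stated objective: alternative
-- what changed: Fuses A's two sequential passes (tag stripping into an intermediate string+mapping, then a whitespace-collapse re-scan of it) into one single loop over the raw html that tracks a can_space flag, never materialising the intermediate stripped text or mapping.
import Mathlib
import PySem

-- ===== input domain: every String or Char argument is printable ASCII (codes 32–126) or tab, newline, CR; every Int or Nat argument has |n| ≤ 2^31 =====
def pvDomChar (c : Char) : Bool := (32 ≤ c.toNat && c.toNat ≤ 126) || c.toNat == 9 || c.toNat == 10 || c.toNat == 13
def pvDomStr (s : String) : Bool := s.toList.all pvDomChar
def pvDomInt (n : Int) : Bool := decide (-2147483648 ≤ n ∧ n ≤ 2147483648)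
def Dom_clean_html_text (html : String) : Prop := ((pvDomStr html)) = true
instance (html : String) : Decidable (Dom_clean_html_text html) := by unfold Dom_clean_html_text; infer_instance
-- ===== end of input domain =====

-- B fuses A's two passes (tag-strip, then whitespace-collapse over the stripped
-- text) into one pass over the raw html with a can_space flag; return value only.

-- ===== PORT A =====
-- while-loop of strip_tags_with_positions: the suffix of the text from index i,
-- with i carried as an Int; text.find('>', i) = findIdx? on that suffix.
def stripGo (l : List Char) (i : Int) : List Char × List Int :=
  match l with
  | [] => ([], [])
  | c :: rest =>
    if c = '<' then
      match (c :: rest).findIdx? (fun x => x = '>') with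
      | none => (c :: (stripGo rest (i + 1)).1, i :: (stripGo rest (i + 1)).2)
      | some k => stripGo (rest.drop k) (i + (k : Int) + 1)  -- i = end + 1
    else (c :: (stripGo rest (i + 1)).1, i :: (stripGo rest (i + 1)).2)
termination_by l.length
decreasing_by all_goals (simp [List.length_drop]; try omega)

-- body of the for-loop of clean_html_text, state = (result, result_map),
-- iterated over zip(text, mapping) (i-th char with mapping[i])
def collapseStep (st : List Char × List Int) (p : Char × Int) : List Char × List Int :=
  if p.1 = ' ' ∨ p.1 = '\n' ∨ p.1 = '\t' then
    if st.1 ≠ [] ∧ st.1.getLast? ≠ some ' ' then (st.1 ++ [' '], st.2 ++ [p.2]) else st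
  else (st.1 ++ [p.1], st.2 ++ [p.2])

def clean_html_text (html : String) : String × List Int :=
  let tm := stripGo html.toList 0
  let r := (tm.1.zip tm.2).foldl collapseStep ([], [])
  (String.ofList r.1, r.2)

-- ===== PORT B =====
-- single while-loop of Source B: suffix from index i, i as Int, cs = can_space
def fusedGo (l : List Char) (i : Int) (cs : Bool) : List Char × List Int :=
  match l with
  | [] => ([], [])
  | c :: rest =>
    if c = '<' then
      match (c :: rest).findIdx? (fun x => x = '>') with
      | none => ('<' :: (fusedGo rest (i + 1) true).1, i :: (fusedGo rest (i + 1) true).2)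
      | some k => fusedGo (rest.drop k) (i + (k : Int) + 1) cs
    else if c = ' ' ∨ c = '\n' ∨ c = '\t' then
      if cs then (' ' :: (fusedGo rest (i + 1) false).1, i :: (fusedGo rest (i + 1) false).2)
      else fusedGo rest (i + 1) cs
    else (c :: (fusedGo rest (i + 1) true).1, i :: (fusedGo rest (i + 1) true).2)
termination_by l.length
decreasing_by all_goals (simp [List.length_drop]; try omega)

def clean_html_text_alt (html : String) : String × List Int :=
  let r := fusedGo html.toList 0 false
  (String.ofList r.1, r.2)

-- ===== PRECONDITION & SPEC =====
def Spec_clean_html_text (html : String) (out : String × List Int) : Prop := out = clean_html_text_alt html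
instance (html : String) (out : String × List Int) : Decidable (Spec_clean_html_text html out) := by unfold Spec_clean_html_text; infer_instance

-- ===== CLAIM (what is proved, stated in full; the proofs are below) =====
def Claim_equal_clean_html_text : Prop := ∀ (html : String), Dom_clean_html_text html → Spec_clean_html_text html (clean_html_text html)

-- ===== LEMMAS AND PROOFS =====

-- front-building version of the collapse loop with the boolean state
def collapseGo (l : List (Char × Int)) (cs : Bool) : List Char × List Int :=
  match l with
  | [] => ([], [])
  | (ch, mi) :: rest =>
    if ch = ' ' ∨ ch = '\n' ∨ ch = '\t' then
      if cs then (' ' :: (collapseGo rest false).1, mi :: (collapseGo rest false).2)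
      else collapseGo rest cs
    else (ch :: (collapseGo rest true).1, mi :: (collapseGo rest true).2)

-- the fused loop = collapseGo applied to the zipped output of the strip loop
theorem fusedGo_eq_collapse (l : List Char) (i : Int) (cs : Bool) :
    fusedGo l i cs = collapseGo ((stripGo l i).1.zip (stripGo l i).2) cs := by
  fun_induction fusedGo l i cs with
  | case1 => simp [stripGo, collapseGo]
  | case2 i cs rest hfind ih =>
    simp only [stripGo, hfind]
    simp [collapseGo, ih]
  | case3 i cs rest k hfind ih =>
    simp only [stripGo, hfind]
    simpa using ih
  | case4 i c rest hne hws ih => simp_all [stripGo, collapseGo]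
  | case5 i cs c rest hne hws hcs ih => simp_all [stripGo, collapseGo]
  | case6 i cs c rest hne hws ih => simp_all [stripGo, collapseGo]

-- the append-accumulator fold = accumulator ++ collapseGo with cs = (acc nonempty ∧ last ≠ ' ')
theorem foldl_collapseStep (l : List (Char × Int)) (res : List Char) (rmap : List Int) :
    l.foldl collapseStep (res, rmap) =
      (res ++ (collapseGo l (decide (res ≠ [] ∧ res.getLast? ≠ some ' '))).1,
       rmap ++ (collapseGo l (decide (res ≠ [] ∧ res.getLast? ≠ some ' '))).2) := by
  induction l generalizing res rmap with
  | nil => simp [collapseGo]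
  | cons p rest ih =>
    obtain ⟨ch, mi⟩ := p
    simp only [List.foldl_cons, collapseStep]
    by_cases hws : ch = ' ' ∨ ch = '\n' ∨ ch = '\t'
    · by_cases hc : res ≠ [] ∧ res.getLast? ≠ some ' '
      · simp [hws, hc, ih, collapseGo]
      · simp [hws, hc, ih, collapseGo]
    · push Not at hws
      obtain ⟨h1, h2, h3⟩ := hws
      simp [h1, h2, h3, ih, collapseGo]

-- ===== VERDICT (by name: the statement is the Claim_ definition above) =====
theorem clean_html_text_spec : Claim_equal_clean_html_text := by
  intro html _
  unfold Spec_clean_html_text clean_html_text clean_html_text_alt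
  simp only [fusedGo_eq_collapse, foldl_collapseStep]
  simp
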